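-- pv_equiv track=rewrite | github.com/asmitahase/shelflife | helpers.py | transform_form_data
-- ===== SOURCE A (Python) =====
-- def transform_form_data(form_data):
--     result = {}
--     for key,value in form_data.items():
--         if key!='csrf_token':
--             isbn,field = key.split('_')
--             if result.get(isbn):
--                 result[isbn][field] = value
--             else:
--                 result[isbn] = {field:value}
--     return result
-- ===== SOURCE B (Python) =====
-- def transform_form_data(form_data):
--     # Different decomposition: flatten to (isbn, field, value) triples, then
--     # group by first-occurrence isbn order with per-isbn dict comprehensions.
--     triples = []
--     for key, value in form_data.items():
--         if key != 'csrf_token':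
--             isbn, field = key.split('_')
--             triples.append((isbn, field, value))
--     isbns = list(dict.fromkeys(isbn for isbn, _, _ in triples))
--     return {i: {f: v for j, f, v in triples if j == i} for i in isbns}
-- ===== Notes on version B (the rewrite author's own statement) =====
-- stated objective: alternative
-- what changed: Replaces A's incremental check-then-insert-or-update of a nested dict with a flatten/group decomposition: build a flat list of (isbn, field, value) triples, deduplicate the isbns in first-occurrence order, then build each inner dict by a comprehension over the triples.
import Mathlib
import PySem

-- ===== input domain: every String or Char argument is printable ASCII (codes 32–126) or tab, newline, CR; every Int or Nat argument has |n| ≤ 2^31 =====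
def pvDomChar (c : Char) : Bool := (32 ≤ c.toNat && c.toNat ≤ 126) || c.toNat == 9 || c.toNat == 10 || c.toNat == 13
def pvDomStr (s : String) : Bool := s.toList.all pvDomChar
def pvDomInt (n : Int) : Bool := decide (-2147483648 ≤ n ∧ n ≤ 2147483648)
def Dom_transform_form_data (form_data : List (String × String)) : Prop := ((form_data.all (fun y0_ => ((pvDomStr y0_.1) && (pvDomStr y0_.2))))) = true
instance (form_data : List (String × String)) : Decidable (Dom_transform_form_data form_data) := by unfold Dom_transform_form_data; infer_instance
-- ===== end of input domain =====

-- B replaces A's incremental insert-or-update of a nested dict by a flatten-to-triples /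
-- group-by-first-occurrence decomposition (alternative structure, same results).


-- ===== PORT A =====
-- literal port of A: one loop over the items, skipping 'csrf_token', splitting the key,
-- and either updating the existing inner dict (Python truthiness test `if result.get(isbn)`)
-- or inserting a fresh one-entry inner dict.  Keys whose split does not give exactly two
-- pieces raise ValueError in Python (excluded by Pre_); the port skips them.
def transform_form_data (form_data : List (String × String)) : List (String × List (String × String)) :=
  let result : PySem.Dict String (PySem.Dict String String) :=
    form_data.foldl (fun result kv =>
      if kv.1 != "csrf_token" then
        match PySem.Str.split? kv.1 "_" with
        | some [isbn, field] =>
          match result.get? isbn with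
          | some m =>
            if !m.items.isEmpty then result.insert isbn (m.insert field kv.2)
            else result.insert isbn (PySem.Dict.ofList [(field, kv.2)])
          | none => result.insert isbn (PySem.Dict.ofList [(field, kv.2)])
        | _ => result
      else result) PySem.Dict.empty
  result.items.map (fun p => (p.1, p.2.items))

-- ===== PORT B =====
-- literal port of B: flatten to triples, dedupe isbns in first-occurrence order
-- (dict.fromkeys = PySem.Set.ofList), then one dict comprehension per isbn.
def transform_form_data_alt (form_data : List (String × String)) : List (String × List (String × String)) :=
  let triples : List (String × String × String) :=
    form_data.foldl (fun triples kv =>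
      if kv.1 != "csrf_token" then
        -- `isbn, field = key.split('_')`: sep is nonempty so split? is always `some`;
        -- the two-element unpack succeeds only when there are exactly two pieces
        let parts := (PySem.Str.split? kv.1 "_").getD []
        if parts.length == 2 then triples ++ [(parts.headD "", (parts.tail.headD "", kv.2))]
        else triples
      else triples) []
  let isbns : PySem.Set String := PySem.Set.ofList (triples.map (fun t => t.1))
  isbns.map (fun i =>
    (i, (PySem.Dict.ofList ((triples.filter (fun t => t.1 == i)).map (fun t => t.2))).items))

-- ===== PRECONDITION & SPEC =====
-- Pre_ excludes exactly the inputs where A raises ValueError: a key other than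
-- 'csrf_token' whose split('_') does not give exactly two pieces (i.e. not exactly one '_').
def Pre_transform_form_data (form_data : List (String × String)) : Prop :=
  ∀ kv ∈ form_data, kv.1 ≠ "csrf_token" → PySem.Str.count kv.1 "_" = 1
instance (form_data : List (String × String)) : Decidable (Pre_transform_form_data form_data) := by unfold Pre_transform_form_data; infer_instance
def pvWitness_transform_form_data : (List (String × String)) :=
  [("123_title", "Dune"), ("csrf_token", "tok"), ("123_author", "Herbert"), ("456_title", "Emma")]

def Spec_transform_form_data (form_data : List (String × String)) (out : List (String × List (String × String))) : Prop := out = transform_form_data_alt form_data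
instance (form_data : List (String × String)) (out : List (String × List (String × String))) : Decidable (Spec_transform_form_data form_data out) := by unfold Spec_transform_form_data; infer_instance

-- ===== CLAIM (what is proved, stated in full; the proofs are below) =====
def Claim_equal_transform_form_data : Prop := ∀ (form_data : List (String × String)), Dom_transform_form_data form_data → Pre_transform_form_data form_data → Spec_transform_form_data form_data (transform_form_data form_data)

-- ===== LEMMAS AND PROOFS =====

-- the common 'skip csrf_token, split the key' selection both loops perform
def pvExtract (kv : String × String) : Option (String × String × String) :=
  if kv.1 != "csrf_token" then
    match PySem.Str.split? kv.1 "_" with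
    | some [isbn, field] => some (isbn, field, kv.2)
    | _ => none
  else none

-- A's loop body on an extracted triple
def pvStep (d : PySem.Dict String (PySem.Dict String String)) (t : String × String × String) :
    PySem.Dict String (PySem.Dict String String) :=
  match d.get? t.1 with
  | some m =>
    if !m.items.isEmpty then d.insert t.1 (m.insert t.2.1 t.2.2)
    else d.insert t.1 (PySem.Dict.ofList [(t.2.1, t.2.2)])
  | none => d.insert t.1 (PySem.Dict.ofList [(t.2.1, t.2.2)])

def pvInner (ts : List (String × String × String)) (i : String) : List (String × String) :=
  (ts.filter (fun t => t.1 == i)).map (fun t => t.2)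

theorem pvFoldl_extract {β : Type} (f : β → String × String × String → β)
    (l : List (String × String)) (b : β) :
    l.foldl (fun b kv => match pvExtract kv with | some t => f b t | none => b) b
      = (l.filterMap pvExtract).foldl f b := by
  induction l generalizing b with
  | nil => rfl
  | cons kv l ih =>
    simp only [List.foldl_cons, List.filterMap_cons]
    cases pvExtract kv <;> simp [ih]

theorem pvA_body (result : PySem.Dict String (PySem.Dict String String)) (kv : String × String) :
    (if kv.1 != "csrf_token" then
        match PySem.Str.split? kv.1 "_" with
        | some [isbn, field] =>
          match result.get? isbn with
          | some m =>
            if !m.items.isEmpty then result.insert isbn (m.insert field kv.2)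
            else result.insert isbn (PySem.Dict.ofList [(field, kv.2)])
          | none => result.insert isbn (PySem.Dict.ofList [(field, kv.2)])
        | _ => result
      else result)
      = match pvExtract kv with | some t => pvStep result t | none => result := by
  unfold pvExtract pvStep
  by_cases h : kv.1 != "csrf_token"
  · simp only [h, if_pos]
    cases hs : PySem.Str.split? kv.1 "_" with
    | none => rfl
    | some parts =>
      match parts with
      | [] => rfl
      | [a] => rfl
      | [a, b] => rfl
      | a :: b :: c :: rest => rfl
  · simp only [h]; rfl

theorem pvB_body (triples : List (String × String × String)) (kv : String × String) :
    (if kv.1 != "csrf_token" then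
        let parts := (PySem.Str.split? kv.1 "_").getD []
        if parts.length == 2 then triples ++ [(parts.headD "", (parts.tail.headD "", kv.2))]
        else triples
      else triples)
      = match pvExtract kv with | some t => triples ++ [t] | none => triples := by
  unfold pvExtract
  by_cases h : kv.1 != "csrf_token"
  · simp only [h, if_pos]
    cases hs : PySem.Str.split? kv.1 "_" with
    | none => rfl
    | some parts =>
      match parts with
      | [] => rfl
      | [a] => rfl
      | [a, b] => rfl
      | a :: b :: c :: rest => rfl
  · simp only [h]; rfl

-- the fold of ofList: a snoc on the pair list is an insert on the dict
theorem pvOfList_snoc (l : List (String × String)) (p : String × String) :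
    PySem.Dict.ofList (l ++ [p]) = (PySem.Dict.ofList l).insert p.1 p.2 := by
  simp [PySem.Dict.ofList, PySem.Dict.update, List.foldl_append]

theorem pvOfList_cons_ne_nil (p : String × String) (l : List (String × String)) :
    (PySem.Dict.ofList (p :: l)).items ≠ [] := by
  have key : ∀ (l : List (String × String)) (d : PySem.Dict String String),
      d.items ≠ [] → (l.foldl (fun acc q => acc.insert q.1 q.2) d).items ≠ [] := by
    intro l
    induction l with
    | nil => intro d h; exact h
    | cons q l ih =>
      intro d h
      apply ih
      by_cases hc : d.contains q.1
      · rw [PySem.Dict.items_insert_of_contains d q.2 hc]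
        simpa using h
      · rw [PySem.Dict.items_insert_of_not_contains d q.2 (by simpa using hc)]
        simp
  show (PySem.Dict.update PySem.Dict.empty (p :: l)).items ≠ []
  unfold PySem.Dict.update
  simp only [List.foldl_cons]
  apply key
  have : (PySem.Dict.empty.insert p.1 p.2 : PySem.Dict String String).items = [(p.1, p.2)] := by
    rfl
  simp [this]

-- the core invariant: A's fold over the triples, read out as items, is B's grouping
theorem pvFold_group (ts : List (String × String × String)) :
    (ts.foldl pvStep PySem.Dict.empty).items
      = (PySem.Set.ofList (ts.map (fun t => t.1))).map
          (fun i => (i, PySem.Dict.ofList (pvInner ts i))) := by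
  induction ts using List.reverseRecOn with
  | nil => rfl
  | append_singleton ts t ih =>
    rw [List.foldl_append, List.foldl_cons, List.foldl_nil]
    set d := ts.foldl pvStep PySem.Dict.empty with hd
    set S : PySem.Set String := PySem.Set.ofList (ts.map (fun t => t.1)) with hS
    have hkeys : d.keys = S := by
      simp only [PySem.Dict.keys]
      rw [ih, List.map_map]
      simp [Function.comp_def]
    have hnd : d.keys.Nodup := by rw [hkeys]; exact PySem.Set.nodup_ofList _
    have hSnoc : PySem.Set.ofList ((ts ++ [t]).map (fun t => t.1)) = S.add t.1 := by
      rw [List.map_append]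
      exact PySem.Set.ofList_append_singleton _ _
    have hInnerEq : ∀ i, t.1 ≠ i → pvInner (ts ++ [t]) i = pvInner ts i := by
      intro i hne
      unfold pvInner
      rw [List.filter_append]
      simp [hne]
    have hInnerSelf : pvInner (ts ++ [t]) t.1 = pvInner ts t.1 ++ [t.2] := by
      unfold pvInner
      rw [List.filter_append]
      simp
    by_cases hmem : t.1 ∈ S
    · -- existing isbn: in-place update of the inner dict
      have hget : d.get? t.1 = some (PySem.Dict.ofList (pvInner ts t.1)) := by
        apply PySem.Dict.get?_of_mem_items d _ hnd
        rw [ih]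
        exact List.mem_map_of_mem hmem
      have hne : pvInner ts t.1 ≠ [] := by
        have := (PySem.Set.mem_ofList _ _).mp hmem
        rcases List.mem_map.mp this with ⟨x, hx, hx1⟩
        unfold pvInner
        simp only [ne_eq, List.map_eq_nil_iff, List.filter_eq_nil_iff, not_forall]
        exact ⟨x, hx, by simp [hx1]⟩
      have hitems : (PySem.Dict.ofList (pvInner ts t.1)).items ≠ [] := by
        rcases List.exists_cons_of_ne_nil hne with ⟨p, l, hpl⟩
        rw [hpl]; exact pvOfList_cons_ne_nil p l
      have hcont : d.contains t.1 = true := by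
        rw [PySem.Dict.contains_iff_mem_keys, hkeys]; exact hmem
      have hstep : pvStep d t = d.insert t.1 ((PySem.Dict.ofList (pvInner ts t.1)).insert t.2.1 t.2.2) := by
        unfold pvStep
        rw [hget]
        have hfalse : ((PySem.Dict.ofList (pvInner ts t.1)).items.isEmpty) = false := by
          simpa [List.isEmpty_iff] using hitems
        simp [hfalse]
      rw [hstep]
      rw [PySem.Dict.items_insert_of_contains d _ hcont, ih, hSnoc,
        PySem.Set.add_of_mem hmem, List.map_map]
      apply List.map_congr_left
      intro i _
      by_cases hi : i = t.1
      · subst hi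
        simp only [Function.comp_apply, beq_self_eq_true, if_pos]
        rw [hInnerSelf, pvOfList_snoc]
      · have : (i == t.1) = false := by simp [hi]
        simp only [Function.comp_apply, this, Bool.false_eq_true, if_neg, not_false_iff]
        rw [hInnerEq i (Ne.symm hi)]
    · -- fresh isbn: appended at the end
      have hget : d.get? t.1 = none := by
        rw [PySem.Dict.get?_eq_none_iff_not_mem_keys, hkeys]; exact hmem
      have hcont : d.contains t.1 = false := by
        rw [← Bool.not_eq_true, PySem.Dict.contains_iff_mem_keys, hkeys]; exact hmem
      have hInnerNil : pvInner ts t.1 = [] := by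
        unfold pvInner
        have : ts.filter (fun x => x.1 == t.1) = [] := by
          rw [List.filter_eq_nil_iff]
          intro x hx
          simp only [beq_iff_eq]
          intro hx1
          exact hmem ((PySem.Set.mem_ofList _ _).mpr (List.mem_map.mpr ⟨x, hx, hx1⟩))
        rw [this]; rfl
      have hstep : pvStep d t = d.insert t.1 (PySem.Dict.ofList [(t.2.1, t.2.2)]) := by
        unfold pvStep
        rw [hget]
      rw [hstep]
      rw [PySem.Dict.items_insert_of_not_contains d _ hcont, ih, hSnoc,
        PySem.Set.add_of_not_mem hmem, List.map_append]
      congr 1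
      · apply List.map_congr_left
        intro i hi
        have : t.1 ≠ i := fun h => hmem (h ▸ hi)
        rw [hInnerEq i this]
      · simp only [List.map_cons, List.map_nil]
        rw [hInnerSelf, hInnerNil]
        simp

theorem transform_form_data_eq (form_data : List (String × String)) :
    transform_form_data form_data = transform_form_data_alt form_data := by
  unfold transform_form_data transform_form_data_alt
  have hA : form_data.foldl (fun result kv =>
      if kv.1 != "csrf_token" then
        match PySem.Str.split? kv.1 "_" with
        | some [isbn, field] =>
          match result.get? isbn with
          | some m =>
            if !m.items.isEmpty then result.insert isbn (m.insert field kv.2)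
            else result.insert isbn (PySem.Dict.ofList [(field, kv.2)])
          | none => result.insert isbn (PySem.Dict.ofList [(field, kv.2)])
        | _ => result
      else result) PySem.Dict.empty
      = (form_data.filterMap pvExtract).foldl pvStep PySem.Dict.empty := by
    rw [← pvFoldl_extract]
    apply PySem.List.foldl_congr_mem
    intro b kv _
    exact pvA_body b kv
  have hB : form_data.foldl (fun triples kv =>
      if kv.1 != "csrf_token" then
        let parts := (PySem.Str.split? kv.1 "_").getD []
        if parts.length == 2 then triples ++ [(parts.headD "", (parts.tail.headD "", kv.2))]
        else triples
      else triples) []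
      = form_data.filterMap pvExtract := by
    rw [show (form_data.filterMap pvExtract)
        = (form_data.filterMap pvExtract).foldl (fun l t => l ++ [t]) [] by
      rw [show (fun (l : List (String × String × String)) t => l ++ [t])
          = fun l t => l ++ [id t] from rfl]
      rw [PySem.List.foldl_append_singleton_eq_map]
      simp]
    rw [← pvFoldl_extract]
    apply PySem.List.foldl_congr_mem
    intro b kv _
    exact pvB_body b kv
  simp only [hA, hB]
  rw [pvFold_group]
  rw [List.map_map]
  rfl

-- ===== VERDICT (by name: the statement is the Claim_ definition above) =====
theorem transform_form_data_spec : Claim_equal_transform_form_data := by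
  intro form_data _ _
  unfold Spec_transform_form_data
  exact transform_form_data_eq form_data
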